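-- pv_equiv track=rewrite | github.com/ghgt1/Algorithm | 프로그래머스/lv2/64065. 튜플/튜플.py | solution
-- ===== SOURCE A (Python) =====
-- def solution(s):
--     answer = []
--     def sort_by(data):
--         return data[1]
--     #개수별로 정렬해야함
--     #정렬된거에서 어떤 원소가 늘어나는지 파악하면끝
--     l1 = s.split('},')
--     l2 = []
--     for k in l1:
--         k = k.replace('{','')
--         k = k.replace('}','')
--         tmp = k.split(',')
--         l2.append((tmp,len(tmp)))
--     result = sorted(l2,key=sort_by)
--     dic={}
--     for k in result:
--         l1, a = k
--         for u in l1: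
--             if u in dic:
--                 continue
--             else:
--                 dic[u] = 1
--                 answer.append(int(u))
--     return answer
-- ===== SOURCE B (Python) =====
-- def solution(s):
--     # counting-sort by group size into buckets instead of a comparison sort
--     groups = []
--     for part in s.split('},'):
--         g = part.replace('{', '').replace('}', '').split(',')
--         groups.append(g)
--     buckets = {}
--     maxlen = 0
--     for g in groups:
--         n = len(g)
--         buckets[n] = buckets.get(n, []) + [g]
--         if maxlen < n:
--             maxlen = n
--     answer = []
--     seen = set()
--     for n in range(1, maxlen + 1):
--         for g in buckets.get(n, []):
--             for u in g:
--                 if u not in seen: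
--                     seen.add(u)
--                     answer.append(int(u))
--     return answer
-- ===== Notes on version B (the rewrite author's own statement) =====
-- stated objective: alternative
-- what changed: Replaces the comparison sort of groups by size with a counting-sort: groups are dropped into length-indexed buckets in one pass and emitted for lengths 1..max, with a set (instead of a dict) doing the dedup; stability of both orders makes the outputs identical.
import Mathlib
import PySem

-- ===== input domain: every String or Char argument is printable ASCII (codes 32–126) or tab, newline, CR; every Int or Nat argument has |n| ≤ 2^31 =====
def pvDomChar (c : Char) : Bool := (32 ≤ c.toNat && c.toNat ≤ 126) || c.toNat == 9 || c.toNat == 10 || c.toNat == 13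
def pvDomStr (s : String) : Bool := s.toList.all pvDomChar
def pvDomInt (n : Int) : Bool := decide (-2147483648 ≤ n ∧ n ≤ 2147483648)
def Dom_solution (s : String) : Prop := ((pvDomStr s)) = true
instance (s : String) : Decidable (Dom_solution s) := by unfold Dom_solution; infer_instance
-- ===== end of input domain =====

-- B replaces A's comparison sort of groups by size with a one-pass counting-sort into
-- length-indexed buckets (and a set instead of a dict for dedup); same return value.


-- ===== PORT A =====
-- literal transliteration of A; int(u) is (PySem.Int.ofStr? u).getD 0, total under Pre_
def solution (s : String) : List Int :=
  let l1 := (PySem.Str.split? s "},").getD []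
  let l2 : List (List String × Int) := l1.foldl (fun acc k =>
      let k1 := PySem.Str.replace k "{" ""
      let k2 := PySem.Str.replace k1 "}" ""
      let tmp := (PySem.Str.split? k2 ",").getD []
      acc ++ [(tmp, PySem.List.len tmp)]) []
  let result := PySem.List.sorted l2 (fun d => d.2) false
  let fin := result.foldl (fun (st : PySem.Dict String Int × List Int) k =>
      k.1.foldl (fun st u =>
        if st.1.contains u then st
        else (st.1.insert u 1, st.2 ++ [(PySem.Int.ofStr? u).getD 0])) st)
      (PySem.Dict.empty, [])
  fin.2

-- ===== PORT B =====
def solution_alt (s : String) : List Int :=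
  let groups : List (List String) := ((PySem.Str.split? s "},").getD []).foldl (fun acc part =>
      acc ++ [(PySem.Str.split?
        (PySem.Str.replace (PySem.Str.replace part "{" "") "}" "") ",").getD []]) []
  let bm := groups.foldl (fun (st : PySem.Dict Int (List (List String)) × Int) g =>
      let n := PySem.List.len g
      (st.1.insert n (st.1.getD n [] ++ [g]), if st.2 < n then n else st.2))
      (PySem.Dict.empty, 0)
  let fin := (PySem.List.pyRange 1 (bm.2 + 1) 1).foldl
      (fun (acc : PySem.Set String × List Int) n =>
        (bm.1.getD n []).foldl (fun acc g =>
          g.foldl (fun acc u =>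
            if PySem.Set.contains acc.1 u then acc
            else (PySem.Set.add acc.1 u, acc.2 ++ [(PySem.Int.ofStr? u).getD 0])) acc) acc)
      (PySem.Set.empty, [])
  fin.2

-- ===== PRECONDITION & SPEC =====
-- helper naming A's/B's tokenisation, used only to state Pre_
def pvParse_solution (k : String) : List String :=
  (PySem.Str.split? (PySem.Str.replace (PySem.Str.replace k "{" "") "}" "") ",").getD []

-- Pre_ excludes exactly the inputs on which Python's int(token) raises ValueError
-- (A calls int on the first occurrence of every distinct token, so A raises iff some token is malformed).
def Pre_solution (s : String) : Prop :=
  ∀ k ∈ (PySem.Str.split? s "},").getD [], ∀ u ∈ pvParse_solution k, (PySem.Int.ofStr? u).isSome = true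
instance (s : String) : Decidable (Pre_solution s) := by unfold Pre_solution; infer_instance
def pvWitness_solution : String := "{{2},{2,1},{2,1,3},{2,1,3,4}}"

def Spec_solution (s : String) (out : List Int) : Prop := out = solution_alt s
instance (s : String) (out : List Int) : Decidable (Spec_solution s out) := by unfold Spec_solution; infer_instance

-- ===== CLAIM (what is proved, stated in full; the proofs are below) =====
def Claim_equal_solution : Prop := ∀ (s : String), Dom_solution s → Pre_solution s → Spec_solution s (solution s)

-- ===== LEMMAS AND PROOFS =====

theorem pv_insertBy_split {α : Type} (before : α → α → Bool) (x : α) (ys zs : List α)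
    (h1 : ∀ y ∈ ys, before x y = false) (h2 : ∀ z ∈ zs, before x z = true) :
    PySem.List.insertBy before x (ys ++ zs) = ys ++ x :: zs := by
  induction ys with
  | nil =>
    cases zs with
    | nil => simp [PySem.List.insertBy]
    | cons z t => simp [PySem.List.insertBy, h2 z (by simp)]
  | cons y t ih =>
    have hy := h1 y (by simp)
    simp only [List.cons_append, PySem.List.insertBy, hy]
    simp [ih (fun y hy => h1 y (by simp [hy]))]

theorem pv_sorted_buckets {α : Type} (key : α → Int) (xs : List α) (lo hi : Int)
    (h : ∀ x ∈ xs, lo ≤ key x ∧ key x < hi) :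
    PySem.List.sorted xs key false =
      (PySem.List.pyRange lo hi).flatMap (fun n => xs.filter (fun x => decide (key x = n))) := by
  rw [PySem.List.sorted_eq_foldl_insertBy]
  induction xs using List.reverseRecOn with
  | nil => simp
  | append_singleton xs x ih =>
    have hx := h x (by simp)
    have hxs : ∀ y ∈ xs, lo ≤ key y ∧ key y < hi := fun y hy => h y (by simp [hy])
    rw [List.foldl_append, List.foldl_cons, List.foldl_nil, ih hxs]
    have hcong : ∀ (R : List Int), (∀ n ∈ R, key x ≠ n) →
        R.flatMap (fun n => (xs ++ [x]).filter (fun y => decide (key y = n)))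
          = R.flatMap (fun n => xs.filter (fun y => decide (key y = n))) := by
      intro R hR
      refine List.flatMap_congr (fun n hn => ?_)
      rw [List.filter_append]
      simp [hR n hn]
    have hsplit : PySem.List.pyRange lo hi
        = PySem.List.pyRange lo (key x) ++ [key x] ++ PySem.List.pyRange (key x + 1) hi := by
      rw [← PySem.List.pyRange_one_singleton (key x), List.append_assoc,
        ← PySem.List.pyRange_one_append (key x) (key x + 1) hi (by omega) (by omega),
        ← PySem.List.pyRange_one_append lo (key x) hi hx.1 (by omega)]
    rw [hsplit]
    simp only [List.flatMap_append, List.flatMap_cons, List.flatMap_nil, List.append_nil]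
    rw [hcong _ (fun n hn => by have := (PySem.List.mem_pyRange_one).1 hn; omega),
        hcong _ (fun n hn => by have := (PySem.List.mem_pyRange_one).1 hn; omega)]
    rw [List.filter_append]
    have hfx : (List.filter (fun y => decide (key y = key x)) [x]) = [x] := by simp
    rw [hfx]
    have key_split := pv_insertBy_split (fun a b => decide (key a < key b)) x
      ((PySem.List.pyRange lo (key x)).flatMap (fun n => xs.filter (fun y => decide (key y = n)))
        ++ xs.filter (fun y => decide (key y = key x)))
      ((PySem.List.pyRange (key x + 1) hi).flatMap (fun n => xs.filter (fun y => decide (key y = n))))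
      ?_ ?_
    · simpa [List.append_assoc] using key_split
    · intro y hy
      rcases List.mem_append.1 hy with hy | hy
      · rcases List.mem_flatMap.1 hy with ⟨n, hn, hyn⟩
        have hn' := (PySem.List.mem_pyRange_one).1 hn
        have := by simpa using (List.mem_filter.1 hyn).2
        simp only [decide_eq_false_iff_not]
        omega
      · have := by simpa using (List.mem_filter.1 hy).2
        simp only [decide_eq_false_iff_not]
        omega
    · intro z hz
      rcases List.mem_flatMap.1 hz with ⟨n, hn, hzn⟩
      have hn' := (PySem.List.mem_pyRange_one).1 hn
      have := by simpa using (List.mem_filter.1 hzn).2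
      simp only [decide_eq_true_eq]
      omega

theorem pv_bucket_getD (gs : List (List String)) (d : PySem.Dict Int (List (List String))) (n : Int) :
    (gs.foldl (fun d g => d.insert (PySem.List.len g) (d.getD (PySem.List.len g) [] ++ [g])) d).getD n []
      = d.getD n [] ++ gs.filter (fun g => decide (PySem.List.len g = n)) := by
  induction gs generalizing d with
  | nil => simp
  | cons g t ih =>
    rw [List.foldl_cons, ih, List.filter_cons]
    simp only [PySem.Dict.getD_insert, PySem.List.len_eq]
    by_cases hn : (g.length : Int) = n
    · subst hn; simp
    · rw [if_neg (fun h => hn h.symm)]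
      simp [hn]

theorem pv_maxfold (gs : List (List String)) :
    ∀ g ∈ gs, PySem.List.len g ≤ gs.foldl (fun m g => if m < PySem.List.len g then PySem.List.len g else m) 0 := by
  have he : gs.foldl (fun m g => if m < PySem.List.len g then PySem.List.len g else m) 0
      = gs.foldl (fun m g => max m (PySem.List.len g)) 0 := by
    refine PySem.List.foldl_congr_mem gs _ _ 0 (fun acc x _ => ?_)
    simp only [PySem.List.len_eq]
    rw [max_def]
    split_ifs <;> omega
  rw [he]
  exact (PySem.List.le_foldl_max_int gs (fun g => PySem.List.len g) 0).2

theorem pv_dedup_fold (ts : List String) (d : PySem.Dict String Int) (se : PySem.Set String)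
    (out : List Int)
    (hc : ∀ u, d.contains u = PySem.Set.contains se u) :
    (ts.foldl (fun st u => if st.1.contains u then st
        else (st.1.insert u 1, st.2 ++ [(PySem.Int.ofStr? u).getD 0])) (d, out)).2
      = (ts.foldl (fun acc u => if PySem.Set.contains acc.1 u then acc
        else (PySem.Set.add acc.1 u, acc.2 ++ [(PySem.Int.ofStr? u).getD 0])) (se, out)).2 := by
  induction ts generalizing d se out with
  | nil => rfl
  | cons u t ih =>
    rw [List.foldl_cons, List.foldl_cons]
    by_cases hu : PySem.Set.contains se u = true
    · simp only [hc u, hu, if_true]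
      exact ih d se out hc
    · have hu' : PySem.Set.contains se u = false := by revert hu; cases PySem.Set.contains se u <;> simp
      simp only [hc u, hu', if_false, Bool.false_eq_true]
      refine ih _ _ _ (fun w => ?_)
      rw [PySem.Dict.contains_insert]
      have hnm : u ∉ se := by
        intro hmem
        rw [(PySem.Set.contains_iff se u).2 hmem] at hu'
        exact absurd hu' (by simp)
      rw [PySem.Set.add_of_not_mem hnm]
      simp only [PySem.Set.contains_eq_listContains] at *
      rcases eq_or_ne w u with h | h
      · simp [h]
      · simp [h, beq_false_of_ne h, hc w]

theorem pv_go_ne_nil (sep : List Char) (fuel : Nat) : ∀ (l cur : List Char) (acc : List (List Char)),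
    PySem.Chars.splitOn.go sep fuel l cur acc ≠ [] := by
  induction fuel with
  | zero => intro l cur acc; simp [PySem.Chars.splitOn.go]
  | succ n ih =>
    intro l cur acc
    cases l with
    | nil => simp [PySem.Chars.splitOn.go]
    | cons c rest =>
      rw [PySem.Chars.splitOn.go]
      split_ifs with h
      · exact ih _ _ _
      · exact ih _ _ _

theorem pv_split_ne_nil (s : String) : (PySem.Str.split? s ",").getD [] ≠ [] := by
  have h := pv_go_ne_nil (",".toList) (s.toList.length + 1) s.toList [] []
  simpa [PySem.Str.split?, PySem.Chars.split?, PySem.Chars.splitOn] using h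


-- ===== VERDICT (by name: the statement is the Claim_ definition above) =====
theorem solution_spec : Claim_equal_solution := by
  intro s _hdom _hpre
  unfold Spec_solution solution solution_alt
  dsimp only
  set parse : String → List String := fun k =>
    (PySem.Str.split? (PySem.Str.replace (PySem.Str.replace k "{" "") "}" "") ",").getD []
    with hparse
  set l1 : List String := (PySem.Str.split? s "},").getD [] with hl1
  rw [PySem.List.foldl_append_singleton_eq_map (fun k => (parse k, PySem.List.len (parse k))) l1 [],
      PySem.List.foldl_append_singleton_eq_map parse l1 []]
  simp only [List.nil_append]
  rw [PySem.List.foldl_prod_mk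
      (f := fun (d : PySem.Dict Int (List (List String))) g =>
        d.insert (PySem.List.len g) (d.getD (PySem.List.len g) [] ++ [g]))
      (g := fun (m : Int) g => if m < PySem.List.len g then PySem.List.len g else m)
      (l := l1.map parse) (a := PySem.Dict.empty) (b := 0)]
  set G : List (List String) := l1.map parse with hG
  set M : Int := G.foldl (fun m g => if m < PySem.List.len g then PySem.List.len g else m) 0 with hM
  have hpair : l1.map (fun k => (parse k, PySem.List.len (parse k)))
      = G.map (fun g => (g, PySem.List.len g)) := by
    rw [hG, List.map_map]
    rfl
  rw [hpair]
  have hbounds : ∀ p ∈ G.map (fun g => (g, PySem.List.len g)), 1 ≤ p.2 ∧ p.2 < M + 1 := by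
    intro p hp
    rcases List.mem_map.1 hp with ⟨g, hg, rfl⟩
    refine ⟨?_, ?_⟩
    · rcases List.mem_map.1 (hG ▸ hg) with ⟨k, _, rfl⟩
      have hne := pv_split_ne_nil (PySem.Str.replace (PySem.Str.replace k "{" "") "}" "")
      have hpos : 0 < (parse k).length := List.length_pos_of_ne_nil hne
      simp only [PySem.List.len_eq]
      omega
    · have := pv_maxfold G g hg
      rw [← hM] at this
      omega
  rw [pv_sorted_buckets (fun d => d.2) (G.map (fun g => (g, PySem.List.len g))) 1 (M + 1) hbounds]
  set stepA : PySem.Dict String Int × List Int → String → PySem.Dict String Int × List Int :=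
    fun st u => if st.1.contains u then st
      else (st.1.insert u 1, st.2 ++ [(PySem.Int.ofStr? u).getD 0]) with hstepA
  set stepB : PySem.Set String × List Int → String → PySem.Set String × List Int :=
    fun acc u => if PySem.Set.contains acc.1 u then acc
      else (PySem.Set.add acc.1 u, acc.2 ++ [(PySem.Int.ofStr? u).getD 0]) with hstepB
  set R : List Int := PySem.List.pyRange 1 (M + 1) with hR
  set bigL : List (List String) := R.flatMap (fun n => G.filter (fun g => decide (PySem.List.len g = n))) with hbigL
  -- A: fold over sorted pairs = fold over their first components
  have hA : (R.flatMap (fun n => (G.map (fun g => (g, PySem.List.len g))).filter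
        (fun x => decide (x.2 = n)))).foldl (fun st k => k.1.foldl stepA st) (PySem.Dict.empty, [])
      = bigL.foldl (fun st g => g.foldl stepA st) (PySem.Dict.empty, []) := by
    have hmfst : (R.flatMap (fun n => (G.map (fun g => (g, PySem.List.len g))).filter
        (fun x => decide (x.2 = n)))).map Prod.fst = bigL := by
      rw [List.map_flatMap, hbigL]
      refine List.flatMap_congr (fun n _ => ?_)
      rw [List.filter_map, List.map_map]
      simp [Function.comp_def]
      rfl
    rw [← hmfst, List.foldl_map]
  rw [hA]
  have hB1 : R.foldl (fun acc n =>
        (((G.foldl (fun d g => d.insert (PySem.List.len g) (d.getD (PySem.List.len g) [] ++ [g]))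
            PySem.Dict.empty, M).1).getD n []).foldl
          (fun acc g => g.foldl stepB acc) acc) (PySem.Set.empty, [])
      = R.foldl (fun acc n =>
        (G.filter (fun g => decide (PySem.List.len g = n))).foldl
          (fun acc g => g.foldl stepB acc) acc) (PySem.Set.empty, []) := by
    refine PySem.List.foldl_congr_mem R _ _ _ (fun acc n _ => ?_)
    rw [show ((G.foldl (fun d g => d.insert (PySem.List.len g) (d.getD (PySem.List.len g) [] ++ [g]))
            PySem.Dict.empty, M).1) = G.foldl (fun d g => d.insert (PySem.List.len g)
            (d.getD (PySem.List.len g) [] ++ [g])) PySem.Dict.empty from rfl,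
        pv_bucket_getD]
    simp
  rw [hB1]
  have hB2 : (R.flatMap (fun n => G.filter (fun g => decide (PySem.List.len g = n)))).foldl
        (fun acc g => g.foldl stepB acc) (PySem.Set.empty, [])
      = R.foldl (fun acc n =>
        (G.filter (fun g => decide (PySem.List.len g = n))).foldl
          (fun acc g => g.foldl stepB acc) acc) (PySem.Set.empty, []) := by
    rw [List.flatMap_def, List.foldl_flatten, List.foldl_map]
  rw [← hB2, ← hbigL]
  rw [← List.foldl_flatten (f := stepA), ← List.foldl_flatten (f := stepB)]
  exact pv_dedup_fold bigL.flatten PySem.Dict.empty PySem.Set.empty []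
    (fun u => by simp [PySem.Dict.contains_empty, PySem.Set.contains_eq_listContains, PySem.Set.empty])
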